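-- pv_equiv track=rewrite | github.com/jg6155/phys-ua210 | ps-4/ex-3/part-b.py | H_iterative
-- ===== SOURCE A (Python) =====
-- def H_iterative(n, x):
--     if n == 0:
--         return 1
--     elif n == 1:
--         return 2*x
--     else:
--         H_n_minus_2 = 1
--         H_n_minus_1 = 2*x
--         for i in range(2, n+1):
--             H_n = 2*x*H_n_minus_1 - 2*(i-1)*H_n_minus_2
--             H_n_minus_2, H_n_minus_1 = H_n_minus_1, H_n
--         return H_n
-- ===== SOURCE B (Python) =====
-- def H_iterative(n, x):
--     # Divide-and-conquer product of the recurrence's 2x2 companion matrices: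
--     # (H_i, H_{i-1})^T = M_i (H_{i-1}, H_{i-2})^T with M_i = [[2x, -2(i-1)], [1, 0]].
--     def mat_mul(A, B):
--         a, b, c, d = A
--         e, f, g, h = B
--         return (a*e + b*g, a*f + b*h, c*e + d*g, c*f + d*h)
--
--     def prod(lo, hi):
--         # product M_hi * M_{hi-1} * ... * M_lo
--         if hi <= lo:
--             return (2*x, -2*(lo - 1), 1, 0)
--         mid = (lo + hi) // 2
--         return mat_mul(prod(mid + 1, hi), prod(lo, mid))
--
--     if n == 0:
--         return 1
--     if n == 1:
--         return 2*x
--     a, b, _, _ = prod(2, n)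
--     return a*(2*x) + b
-- ===== Notes on version B (the rewrite author's own statement) =====
-- stated objective: alternative
-- what changed: B replaces A's linear upward two-rolling-value loop by a divide-and-conquer product of the recurrence's 2x2 companion matrices, applied to the base vector (H_1, H_0).
import Mathlib
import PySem

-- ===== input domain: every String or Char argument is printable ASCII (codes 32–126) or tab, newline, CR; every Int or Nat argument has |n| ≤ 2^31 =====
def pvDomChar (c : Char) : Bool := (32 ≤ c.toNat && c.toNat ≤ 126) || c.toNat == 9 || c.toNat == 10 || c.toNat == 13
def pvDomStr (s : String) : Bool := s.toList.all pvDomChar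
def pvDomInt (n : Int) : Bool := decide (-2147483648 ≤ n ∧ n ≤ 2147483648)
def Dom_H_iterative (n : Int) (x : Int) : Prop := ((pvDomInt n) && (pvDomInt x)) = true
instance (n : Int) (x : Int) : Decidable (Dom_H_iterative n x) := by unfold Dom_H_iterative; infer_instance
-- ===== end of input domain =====

-- B replaces A's linear two-rolling-value loop by a divide-and-conquer product of the
-- recurrence's 2x2 companion matrices (objective: alternative algorithm, same exact values).

-- ===== PORT A =====
-- the loop body of A: state (H_n_minus_2, H_n_minus_1, H_n)
def pvStepA (x : Int) (st : Int × Int × Int) (i : Int) : Int × Int × Int :=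
  let hn := 2*x*st.2.1 - 2*(i-1)*st.1
  (st.2.1, hn, hn)

def H_iterative (n : Int) (x : Int) : Int :=
  if n = 0 then 1
  else if n = 1 then 2*x
  else ((PySem.List.pyRange 2 (n+1) 1).foldl (pvStepA x) (1, 2*x, 0)).2.2

-- ===== PORT B =====
def pvMatMul (A B : Int × Int × Int × Int) : Int × Int × Int × Int :=
  (A.1*B.1 + A.2.1*B.2.2.1, A.1*B.2.1 + A.2.1*B.2.2.2,
   A.2.2.1*B.1 + A.2.2.2*B.2.2.1, A.2.2.1*B.2.1 + A.2.2.2*B.2.2.2)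

-- product M_hi * M_{hi-1} * ... * M_lo of the companion matrices M_i = [[2x, -2(i-1)], [1, 0]]
def pvProd (x lo hi : Int) : Int × Int × Int × Int :=
  if hle : hi ≤ lo then (2*x, -2*(lo-1), 1, 0)
  else
    let mid := PySem.Int.floordiv (lo + hi) 2
    pvMatMul (pvProd x (mid+1) hi) (pvProd x lo mid)
termination_by (hi - lo).toNat
decreasing_by
  all_goals
    have hlt : lo < hi := not_le.mp hle
    have hb := PySem.Int.floordiv_two_mid_bounds (le_of_lt hlt)
    have hm : PySem.Int.floordiv (lo + hi) 2 < hi :=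
      (PySem.Int.floordiv_lt_iff_lt_mul (by norm_num)).2 (by omega)
    omega

def H_iterative_alt (n : Int) (x : Int) : Int :=
  if n = 0 then 1
  else if n = 1 then 2*x
  else
    let A := pvProd x 2 n
    A.1*(2*x) + A.2.1

-- ===== PRECONDITION & SPEC =====
-- Pre_ excludes n < 0, on which A raises UnboundLocalError (the loop body never runs, H_n is unbound).
def Pre_H_iterative (n : Int) (x : Int) : Prop := 0 ≤ n
instance (n : Int) (x : Int) : Decidable (Pre_H_iterative n x) := by unfold Pre_H_iterative; infer_instance
def pvWitness_H_iterative : Int × Int := (3, 2)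

def Spec_H_iterative (n : Int) (x : Int) (out : Int) : Prop := out = H_iterative_alt n x
instance (n : Int) (x : Int) (out : Int) : Decidable (Spec_H_iterative n x out) := by unfold Spec_H_iterative; infer_instance

-- ===== CLAIM (what is proved, stated in full; the proofs are below) =====
def Claim_equal_H_iterative : Prop := ∀ (n : Int) (x : Int), Dom_H_iterative n x → Pre_H_iterative n x → Spec_H_iterative n x (H_iterative n x)

-- ===== LEMMAS AND PROOFS =====

def pvM (x i : Int) : Int × Int × Int × Int := (2*x, -2*(i-1), 1, 0)

def pvApp (A : Int × Int × Int × Int) (v : Int × Int) : Int × Int :=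
  (A.1*v.1 + A.2.1*v.2, A.2.2.1*v.1 + A.2.2.2*v.2)

-- left-recursive reference product M_hi * ... * M_lo
def pvLinP (x lo hi : Int) : Int × Int × Int × Int :=
  if hi ≤ lo then pvM x lo else pvMatMul (pvM x hi) (pvLinP x lo (hi-1))
termination_by (hi - lo).toNat
decreasing_by omega

-- pvQ x k = (H_{k+1}, H_k)
def pvQ (x : Int) : Nat → Int × Int
  | 0 => (2*x, 1)
  | k+1 => pvApp (pvM x ((k:Int)+2)) (pvQ x k)

theorem pvMatMul_assoc (A B C : Int × Int × Int × Int) :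
    pvMatMul (pvMatMul A B) C = pvMatMul A (pvMatMul B C) := by
  simp only [pvMatMul, Prod.mk.injEq]
  refine ⟨by ring, by ring, by ring, by ring⟩

theorem pvApp_mul (A B : Int × Int × Int × Int) (v : Int × Int) :
    pvApp (pvMatMul A B) v = pvApp A (pvApp B v) := by
  simp only [pvMatMul, pvApp, Prod.mk.injEq]
  exact ⟨by ring, by ring⟩

theorem pvLinP_split (x lo m : Int) (hm : lo ≤ m) :
    ∀ (k : Nat), pvLinP x lo (m+1+(k:Int)) = pvMatMul (pvLinP x (m+1) (m+1+(k:Int))) (pvLinP x lo m) := by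
  intro k
  induction k with
  | zero =>
      have h0 : m + 1 + ((0:Nat):Int) = m + 1 := by omega
      rw [h0]
      have hb : pvLinP x (m+1) (m+1) = pvM x (m+1) := by
        rw [pvLinP, if_pos le_rfl]
      conv_lhs => rw [pvLinP]
      rw [if_neg (by omega), show m+1-1 = m from by ring, hb]
  | succ k ih =>
      conv_lhs => rw [pvLinP]
      rw [if_neg (by push_cast; omega), show m+1+((k+1:Nat):Int)-1 = m+1+(k:Int) from by omega, ih]
      conv_rhs => rw [pvLinP]
      rw [if_neg (by push_cast; omega), show m+1+((k+1:Nat):Int)-1 = m+1+(k:Int) from by omega,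
        pvMatMul_assoc]

theorem pvProd_eq_linP : ∀ (d : Nat) (x lo hi : Int), lo ≤ hi → (hi - lo).toNat ≤ d →
    pvProd x lo hi = pvLinP x lo hi := by
  intro d
  induction d with
  | zero =>
      intro x lo hi h1 h2
      have he : hi = lo := by omega
      rw [pvProd, pvLinP, he, dif_pos (by omega), if_pos (by omega), pvM]
  | succ d ih =>
      intro x lo hi h1 h2
      by_cases hle : hi ≤ lo
      · rw [pvProd, pvLinP, dif_pos hle, if_pos hle, pvM]
      · have hlt : lo < hi := not_le.mp hle
        have hb := PySem.Int.floordiv_two_mid_bounds (le_of_lt hlt)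
        have hmhi : PySem.Int.floordiv (lo + hi) 2 < hi :=
          (PySem.Int.floordiv_lt_iff_lt_mul (by norm_num)).2 (by omega)
        set mid := PySem.Int.floordiv (lo + hi) 2 with hmid
        rw [pvProd, dif_neg hle]
        show pvMatMul (pvProd x (mid + 1) hi) (pvProd x lo mid) = pvLinP x lo hi
        rw [ih x (mid+1) hi (by omega) (by omega), ih x lo mid (by omega) (by omega)]
        have hk : hi = mid + 1 + ((hi - mid - 1).toNat : Int) := by omega
        rw [hk]
        exact (pvLinP_split x lo mid (by omega) ((hi - mid - 1).toNat)).symm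

theorem pvApp_linP (x : Int) : ∀ (k : Nat),
    pvApp (pvLinP x 2 ((k:Int)+2)) (2*x, 1) = pvQ x (k+1) := by
  intro k
  induction k with
  | zero =>
      rw [pvLinP, if_pos (by omega)]
      simp only [pvQ, pvApp, pvM, Prod.mk.injEq]
      constructor <;> (push_cast; try ring_nf)
  | succ k ih =>
      conv_lhs => rw [pvLinP]
      rw [if_neg (by push_cast; omega),
        show ((k+1:Nat):Int)+2-1 = (k:Int)+2 from by omega, pvApp_mul, ih]
      have hq : pvQ x (k+1+1) = pvApp (pvM x (((k+1:Nat):Int)+2)) (pvQ x (k+1)) := rfl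
      rw [hq]

theorem pvFoldA (x : Int) : ∀ (k : Nat),
    (PySem.List.pyRange 2 ((k:Int)+3) 1).foldl (pvStepA x) (1, 2*x, 0)
      = ((pvQ x (k+1)).2, (pvQ x (k+1)).1, (pvQ x (k+1)).1) := by
  intro k
  induction k with
  | zero =>
      have h : ((0:Nat):Int) + 3 = 3 := by omega
      rw [h, show PySem.List.pyRange 2 3 1 = [2] from by decide]
      simp only [List.foldl, pvStepA, pvQ, pvApp, pvM, Prod.mk.injEq]
      refine ⟨by push_cast; ring_nf, by push_cast; ring_nf, by push_cast; ring_nf⟩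
  | succ k ih =>
      have h1 : ((k+1 : Nat) : Int) + 3 = ((k:Int) + 3) + 1 := by omega
      rw [h1, PySem.List.pyRange_one_succ_right (by omega), List.foldl_append, ih]
      have hq : pvQ x (k+1+1) = pvApp (pvM x (((k+1:Nat):Int)+2)) (pvQ x (k+1)) := rfl
      rw [hq]
      simp only [List.foldl, pvStepA, pvApp, pvM, Prod.mk.injEq]
      push_cast
      refine ⟨by ring, by ring, by ring⟩

-- ===== VERDICT (by name: the statement is the Claim_ definition above) =====
theorem H_iterative_spec : Claim_equal_H_iterative := by
  intro n x hdom hpre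
  unfold Spec_H_iterative H_iterative H_iterative_alt
  by_cases h0 : n = 0
  · simp [h0]
  by_cases h1 : n = 1
  · simp [h1]
  have h2 : 2 ≤ n := by
    unfold Pre_H_iterative at hpre; omega
  rw [if_neg h0, if_neg h1, if_neg h0, if_neg h1]
  set k : Nat := (n - 2).toNat with hk
  have hn : n = (k:Int) + 2 := by omega
  have hAside : (PySem.List.pyRange 2 (n+1) 1).foldl (pvStepA x) (1, 2*x, 0)
      = ((pvQ x (k+1)).2, (pvQ x (k+1)).1, (pvQ x (k+1)).1) := by
    have : n + 1 = (k:Int) + 3 := by omega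
    rw [this]; exact pvFoldA x k
  have hBside : pvProd x 2 n = pvLinP x 2 ((k:Int)+2) := by
    rw [← hn]; exact pvProd_eq_linP (n-2).toNat x 2 n (by omega) (by omega)
  rw [hAside, hBside]
  have happ := pvApp_linP x k
  have h5 : (pvLinP x 2 ((k:Int)+2)).1*(2*x) + (pvLinP x 2 ((k:Int)+2)).2.1
      = (pvApp (pvLinP x 2 ((k:Int)+2)) (2*x, 1)).1 := by
    simp only [pvApp]; ring
  simp only [h5, happ]
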